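-- pv_equiv track=rewrite | github.com/masonproffitt/advent-of-code | 2024/12/part-2.py | get_n_sides
-- ===== SOURCE A (Python) =====
-- def get_n_sides(fence_sections):
--     n_sides = 0
--     remaining_fence_sections = list(fence_sections)
--     while len(remaining_fence_sections) > 0:
--         fs = remaining_fence_sections[0]
--         if fs[1][0] == 0:
--             step = [1, 0]
--         else:
--             step = [0, 1]
--         n = 1
--         while True:
--             next_fs = ((fs[0][0] + n * step[0], fs[0][1] + n * step[1]), fs[1])
--             if next_fs in remaining_fence_sections[1:]:
--                 remaining_fence_sections.remove(next_fs)
--                 n += 1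
--             else:
--                 break
--         n = -1
--         while True:
--             next_fs = ((fs[0][0] + n * step[0], fs[0][1] + n * step[1]), fs[1])
--             if next_fs in remaining_fence_sections[1:]:
--                 remaining_fence_sections.remove(next_fs)
--                 n -= 1
--             else:
--                 break
--         remaining_fence_sections.remove(fs)
--         n_sides += 1
--
--     return n_sides
-- ===== SOURCE B (Python) =====
-- def get_n_sides(fence_sections):
--     present = set(fence_sections)
--     total = 0
--     for fs in present:
--         if fs[1][0] == 0:
--             prev = ((fs[0][0] - 1, fs[0][1]), fs[1])
--         else:
--             prev = ((fs[0][0], fs[0][1] - 1), fs[1])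
--         if prev not in present:
--             total += 1
--     return total
-- ===== Notes on version B (the rewrite author's own statement) =====
-- stated objective: faster
-- what changed: Instead of A's destructive greedy scan (repeatedly extending a run in both directions with O(n) membership tests and list.remove on a shrinking list), B builds one hash set and counts, in a single pass, the sections whose predecessor along their fence line is absent: each such 'run start' identifies exactly one side.
-- outside the precondition, e.g. on get_n_sides([((0, 0), (0, 1)), ((0, 0), (0, 1))]): A returns 2, B returns 1
import Mathlib
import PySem

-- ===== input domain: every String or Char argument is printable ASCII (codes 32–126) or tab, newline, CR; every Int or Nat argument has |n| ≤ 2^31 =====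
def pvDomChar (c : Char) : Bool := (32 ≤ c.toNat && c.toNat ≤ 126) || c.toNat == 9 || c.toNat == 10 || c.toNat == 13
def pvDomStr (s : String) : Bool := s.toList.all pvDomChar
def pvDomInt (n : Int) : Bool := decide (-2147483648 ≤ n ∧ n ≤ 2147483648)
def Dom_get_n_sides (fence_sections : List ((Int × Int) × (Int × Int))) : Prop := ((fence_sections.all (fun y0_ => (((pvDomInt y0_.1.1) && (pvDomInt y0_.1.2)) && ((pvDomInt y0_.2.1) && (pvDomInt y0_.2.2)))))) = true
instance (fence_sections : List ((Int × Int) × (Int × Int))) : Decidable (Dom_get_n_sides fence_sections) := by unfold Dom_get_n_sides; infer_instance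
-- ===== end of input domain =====

-- B replaces A's destructive greedy run-extension (repeated list membership/remove) by one hash set
-- and a single pass counting run-start sections (predecessor absent); return value only, A copies its input.

-- ===== PORT A =====
-- step selection, the two symmetric inner while-loops (dir = +1 / -1) and the outer while-loop;
-- each loop is fueled by the current list length, which strictly bounds its iteration count.
def pvStepA (fs : (Int × Int) × (Int × Int)) : Int × Int :=
  if fs.2.1 = 0 then (1, 0) else (0, 1)

def pvInner (fs : (Int × Int) × (Int × Int)) (step : Int × Int) (dir : Int) :
    Nat → List ((Int × Int) × (Int × Int)) → Int →
    List ((Int × Int) × (Int × Int)) × Int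
  | 0, rem, n => (rem, n)
  | fuel + 1, rem, n =>
    let next_fs : (Int × Int) × (Int × Int) :=
      ((fs.1.1 + n * step.1, fs.1.2 + n * step.2), fs.2)
    if next_fs ∈ rem.tail then
      pvInner fs step dir fuel ((PySem.List.remove? rem next_fs).getD rem) (n + dir)
    else (rem, n)

def pvOuter : Nat → List ((Int × Int) × (Int × Int)) → Int → Int
  | 0, _, n_sides => n_sides
  | fuel + 1, rem, n_sides =>
    match rem with
    | [] => n_sides
    | fs :: _ =>
      let step := pvStepA fs
      let r1 := pvInner fs step 1 rem.length rem 1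
      let r2 := pvInner fs step (-1) r1.1.length r1.1 (-1)
      let rem3 := (PySem.List.remove? r2.1 fs).getD r2.1
      pvOuter fuel rem3 (n_sides + 1)

def get_n_sides (fence_sections : List ((Int × Int) × (Int × Int))) : Int :=
  pvOuter fence_sections.length fence_sections 0

-- ===== PORT B =====
def get_n_sides_alt (fence_sections : List ((Int × Int) × (Int × Int))) : Int :=
  let present := PySem.Set.ofList fence_sections
  present.foldl
    (fun total fs =>
      let prev : (Int × Int) × (Int × Int) :=
        if fs.2.1 = 0 then ((fs.1.1 - 1, fs.1.2), fs.2) else ((fs.1.1, fs.1.2 - 1), fs.2)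
      if prev ∈ present then total else total + 1) 0

-- ===== PRECONDITION & SPEC =====
-- Pre_ excludes lists with a repeated section, on which A's greedy multiset removal double-counts
-- (each copy starts its own side) while B's set dedupes; both behaviours are accidental there.
def Pre_get_n_sides (fence_sections : List ((Int × Int) × (Int × Int))) : Prop :=
  fence_sections.Nodup
instance (fence_sections : List ((Int × Int) × (Int × Int))) : Decidable (Pre_get_n_sides fence_sections) := by unfold Pre_get_n_sides; infer_instance

def pvWitness_get_n_sides : (List ((Int × Int) × (Int × Int))) :=
  [((0, 0), (0, 1)), ((1, 0), (0, 1)), ((5, 5), (1, 0))]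

def Spec_get_n_sides (fence_sections : List ((Int × Int) × (Int × Int))) (out : Int) : Prop := out = get_n_sides_alt fence_sections
instance (fence_sections : List ((Int × Int) × (Int × Int))) (out : Int) : Decidable (Spec_get_n_sides fence_sections out) := by unfold Spec_get_n_sides; infer_instance

-- ===== CLAIM (what is proved, stated in full; the proofs are below) =====
def Claim_equal_get_n_sides : Prop := ∀ (fence_sections : List ((Int × Int) × (Int × Int))), Dom_get_n_sides fence_sections → Pre_get_n_sides fence_sections → Spec_get_n_sides fence_sections (get_n_sides fence_sections)

-- ===== LEMMAS AND PROOFS =====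

-- the neighbour at signed offset n along fs's fence line (same orientation fs.2)
def pvNbr (fs : (Int × Int) × (Int × Int)) (n : Int) : (Int × Int) × (Int × Int) :=
  ((fs.1.1 + n * (pvStepA fs).1, fs.1.2 + n * (pvStepA fs).2), fs.2)

-- number of run-start sections of R (what B counts)
def pvMu (R : List ((Int × Int) × (Int × Int))) : Int :=
  (R.countP (fun x => decide (pvNbr x (-1) ∉ R)) : Int)

theorem pvNbr_add (fs : (Int × Int) × (Int × Int)) (n m : Int) :
    pvNbr (pvNbr fs n) m = pvNbr fs (n + m) := by
  unfold pvNbr pvStepA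
  by_cases h : fs.2.1 = 0 <;> simp [h, Prod.ext_iff] <;> ring

theorem pvNbr_inj (fs : (Int × Int) × (Int × Int)) {n m : Int}
    (h : pvNbr fs n = pvNbr fs m) : n = m := by
  unfold pvNbr pvStepA at h
  by_cases hc : fs.2.1 = 0 <;> simp [hc, Prod.ext_iff] at h <;> omega

theorem pvNbr_zero (fs : (Int × Int) × (Int × Int)) : pvNbr fs 0 = fs := by
  simp [pvNbr]

theorem pvInner_spec (fs : (Int × Int) × (Int × Int)) (dir : Int)
    (hdir : dir = 1 ∨ dir = -1) :
    ∀ (fuel : Nat) (rest : List ((Int × Int) × (Int × Int))) (n : Int),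
      (fs :: rest).Nodup → rest.length < fuel → 1 ≤ n * dir →
      ∃ (steps : Nat) (rest' : List ((Int × Int) × (Int × Int))),
        pvInner fs (pvStepA fs) dir fuel (fs :: rest) n = (fs :: rest', n + steps * dir) ∧
        (∀ j : Nat, j < steps → pvNbr fs (n + j * dir) ∈ rest) ∧
        pvNbr fs (n + steps * dir) ∉ rest' ∧
        (∀ x, x ∈ rest' ↔ x ∈ rest ∧ ∀ j : Nat, j < steps → x ≠ pvNbr fs (n + j * dir)) ∧
        rest'.length ≤ rest.length ∧ rest'.Nodup := by
  intro fuel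
  induction fuel with
  | zero => intro rest n _ hlen _; omega
  | succ fuel ih =>
    intro rest n hnd hlen hsign
    have hne0 : n ≠ 0 := by
      rcases hdir with h | h <;> subst h <;> intro h0 <;> subst h0 <;> simp at hsign
    by_cases hv : pvNbr fs n ∈ rest
    · -- the neighbour is present: remove it and continue
      have hfsne : fs ≠ pvNbr fs n := by
        intro h
        exact hne0 (pvNbr_inj fs ((pvNbr_zero fs).trans h)).symm
      have hrem : (PySem.List.remove? (fs :: rest) (pvNbr fs n)).getD (fs :: rest)
          = fs :: rest.erase (pvNbr fs n) := by
        rw [PySem.List.remove?_cons_of_ne rest hfsne,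
          PySem.List.remove?_eq_some_erase rest _ hv]
        rfl
      have hstep : pvInner fs (pvStepA fs) dir (fuel + 1) (fs :: rest) n
          = pvInner fs (pvStepA fs) dir fuel (fs :: rest.erase (pvNbr fs n)) (n + dir) := by
        show (if pvNbr fs n ∈ (fs :: rest).tail then
            pvInner fs (pvStepA fs) dir fuel
              ((PySem.List.remove? (fs :: rest) (pvNbr fs n)).getD (fs :: rest)) (n + dir)
          else (fs :: rest, n)) = _
        rw [List.tail_cons, if_pos hv, hrem]
      have hposlen : 0 < rest.length := List.length_pos_of_mem hv
      have hndrest : rest.Nodup := (List.nodup_cons.mp hnd).2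
      have hnd2 : (fs :: rest.erase (pvNbr fs n)).Nodup := by
        rw [List.nodup_cons]
        exact ⟨fun hc => (List.nodup_cons.mp hnd).1 (List.mem_of_mem_erase hc),
          hndrest.erase _⟩
      have hlen2 : (rest.erase (pvNbr fs n)).length < fuel := by
        rw [List.length_erase_of_mem hv]; omega
      have hsign2 : 1 ≤ (n + dir) * dir := by
        rcases hdir with h | h <;> subst h <;> simp at hsign ⊢ <;> omega
      obtain ⟨steps, rest', heq, hmem, hexit, hchar, hlen', hnd'⟩ :=
        ih (rest.erase (pvNbr fs n)) (n + dir) hnd2 hlen2 hsign2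
      have hidx : ∀ j : Nat, n + dir + (j : Int) * dir = n + ((j : Nat) + 1 : Nat) * dir := by
        intro j; push_cast; ring
      refine ⟨steps + 1, rest', ?_, ?_, ?_, ?_, ?_, hnd'⟩
      · rw [hstep, heq, hidx steps]
      · intro j hj
        match j with
        | 0 => simpa using hv
        | (j' + 1) =>
          have h1 := hmem j' (by omega)
          rw [hidx j'] at h1
          exact List.mem_of_mem_erase h1
      · rw [hidx steps] at hexit; exact hexit
      · intro x
        rw [hchar x, hndrest.mem_erase_iff]
        constructor
        · rintro ⟨⟨hxv, hxrest⟩, hall⟩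
          refine ⟨hxrest, fun j hj => ?_⟩
          match j with
          | 0 => simpa using hxv
          | (j' + 1) =>
            have h1 := hall j' (by omega)
            rw [hidx j'] at h1
            exact h1
        · rintro ⟨hxrest, hall⟩
          refine ⟨⟨by simpa using hall 0 (by omega), hxrest⟩, fun j hj => ?_⟩
          have h1 := hall (j + 1) (by omega)
          rw [← hidx j] at h1
          exact h1
      · rw [List.length_erase_of_mem hv] at hlen'; omega
    · -- the neighbour is absent: stop
      have hstep : pvInner fs (pvStepA fs) dir (fuel + 1) (fs :: rest) n = (fs :: rest, n) := by
        show (if pvNbr fs n ∈ (fs :: rest).tail then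
            pvInner fs (pvStepA fs) dir fuel
              ((PySem.List.remove? (fs :: rest) (pvNbr fs n)).getD (fs :: rest)) (n + dir)
          else (fs :: rest, n)) = _
        rw [List.tail_cons, if_neg hv]
      refine ⟨0, rest, ?_, fun j hj => absurd hj (Nat.not_lt_zero j), ?_, ?_, le_rfl,
        (List.nodup_cons.mp hnd).2⟩
      · rw [hstep]; norm_num
      · simpa using hv
      · intro x
        exact ⟨fun h => ⟨h, fun j hj => absurd hj (Nat.not_lt_zero j)⟩, And.left⟩

theorem pvMu_remove_run (fs : (Int × Int) × (Int × Int)) (g f : Nat)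
    (R R' : List ((Int × Int) × (Int × Int)))
    (hR : R.Nodup) (hR' : R'.Nodup)
    (hmem : ∀ x, x ∈ R' ↔ x ∈ R ∧ ∀ i : Int, -(g : Int) ≤ i → i ≤ (f : Int) → x ≠ pvNbr fs i)
    (hin : ∀ i : Int, -(g : Int) ≤ i → i ≤ (f : Int) → pvNbr fs i ∈ R)
    (hhi : pvNbr fs ((f : Int) + 1) ∉ R) (hlo : pvNbr fs (-(g : Int) - 1) ∉ R) :
    pvMu R = pvMu R' + 1 := by
  have hmemRun : ∀ x, x ∈ (List.range (g + f + 1)).map (fun (j : Nat) => pvNbr fs ((j : Int) - (g : Int))) ↔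
      ∃ i : Int, -(g : Int) ≤ i ∧ i ≤ (f : Int) ∧ x = pvNbr fs i := by
    intro x
    simp only [List.mem_map, List.mem_range]
    constructor
    · rintro ⟨j, hj, rfl⟩
      exact ⟨(j : Int) - g, by omega, by omega, rfl⟩
    · rintro ⟨i, h1, h2, rfl⟩
      refine ⟨(i + g).toNat, by omega, ?_⟩
      congr 1
      omega
  have hRunNodup : ((List.range (g + f + 1)).map (fun (j : Nat) => pvNbr fs ((j : Int) - (g : Int)))).Nodup := by
    refine List.Nodup.map_on ?_ List.nodup_range
    intro x _ y _ hxy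
    have := pvNbr_inj fs hxy
    omega
  have hRunSub : ∀ x ∈ (List.range (g + f + 1)).map (fun (j : Nat) => pvNbr fs ((j : Int) - (g : Int))), x ∈ R := by
    intro x hx
    obtain ⟨i, h1, h2, rfl⟩ := (hmemRun x).mp hx
    exact hin i h1 h2
  have hdisj : ∀ x ∈ (List.range (g + f + 1)).map (fun (j : Nat) => pvNbr fs ((j : Int) - (g : Int))), x ∉ R' := by
    intro x hx hx'
    obtain ⟨i, h1, h2, rfl⟩ := (hmemRun x).mp hx
    exact ((hmem _).mp hx').2 i h1 h2 rfl
  have hperm : R.Perm ((List.range (g + f + 1)).map (fun (j : Nat) => pvNbr fs ((j : Int) - (g : Int))) ++ R') := by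
    rw [List.perm_ext_iff_of_nodup hR
      (List.nodup_append.mpr ⟨hRunNodup, hR', fun a ha b hb hab => hdisj a ha (hab ▸ hb)⟩)]
    intro x
    rw [List.mem_append]
    constructor
    · intro hx
      by_cases hxr : x ∈ (List.range (g + f + 1)).map (fun (j : Nat) => pvNbr fs ((j : Int) - (g : Int)))
      · exact Or.inl hxr
      · refine Or.inr ((hmem x).mpr ⟨hx, fun i h1 h2 hxi => hxr ((hmemRun x).mpr ⟨i, h1, h2, hxi⟩)⟩)
    · rintro (hx | hx)
      · exact hRunSub x hx
      · exact ((hmem x).mp hx).1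
  have hrun1 : ((List.range (g + f + 1)).map (fun (j : Nat) => pvNbr fs ((j : Int) - (g : Int)))).countP
      (fun x => decide (pvNbr x (-1) ∉ R)) = 1 := by
    rw [List.countP_map]
    have hcongr : ∀ j ∈ List.range (g + f + 1),
        ((fun x => decide (pvNbr x (-1) ∉ R)) ∘ fun (j : Nat) => pvNbr fs ((j : Int) - (g : Int))) j = true ↔
        (fun j => decide (j = 0)) j = true := by
      intro j hj
      simp only [List.mem_range] at hj
      simp only [Function.comp_apply, pvNbr_add, decide_eq_true_eq]
      by_cases h0 : j = 0
      · subst h0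
        have hlo' : pvNbr fs (-(g : Int) + -1) ∉ R := by
          rw [show -(g : Int) + -1 = -(g : Int) - 1 from by ring]
          exact hlo
        simp [hlo']
      · have hinj : pvNbr fs ((j : Int) - g + -1) ∈ R :=
          hin _ (by omega) (by omega)
        simp [hinj, h0]
    rw [List.countP_congr hcongr]
    rw [List.range_succ_eq_map, List.countP_cons]
    have hz : List.countP (fun j => decide (j = 0)) (List.map Nat.succ (List.range (g + f))) = 0 :=
      List.countP_eq_zero.mpr (by
        intro a ha
        simp only [List.mem_map] at ha
        obtain ⟨b, _, rfl⟩ := ha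
        simp)
    rw [hz]
    simp
  have h2 : R'.countP (fun x => decide (pvNbr x (-1) ∉ R))
      = R'.countP (fun x => decide (pvNbr x (-1) ∉ R')) := by
    apply List.countP_congr
    intro x hx
    have hxR : x ∈ R := ((hmem x).mp hx).1
    have hiff : pvNbr x (-1) ∈ R ↔ pvNbr x (-1) ∈ R' := by
      constructor
      · intro hprevR
        by_contra hprevR'
        have hnot : ¬ (∀ i : Int, -(g : Int) ≤ i → i ≤ (f : Int) → pvNbr x (-1) ≠ pvNbr fs i) :=
          fun hall => hprevR' ((hmem _).mpr ⟨hprevR, hall⟩)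
        push Not at hnot
        obtain ⟨i, h1, h2, heq⟩ := hnot
        have hx1 : x = pvNbr fs (i + 1) := by
          have hc := congrArg (fun y => pvNbr y 1) heq
          simpa [pvNbr_add, pvNbr_zero] using hc
        by_cases hif : i + 1 ≤ (f : Int)
        · exact ((hmem x).mp hx).2 (i + 1) (by omega) hif hx1
        · have hieq : i = (f : Int) := by omega
          subst hieq
          exact hhi (hx1 ▸ hxR)
      · intro h
        exact ((hmem _).mp h).1
    simp [hiff]
  unfold pvMu
  rw [hperm.countP_eq, List.countP_append, hrun1, h2]
  push_cast
  ring
theorem pvOuter_spec :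
    ∀ (fuel : Nat) (rem : List ((Int × Int) × (Int × Int))) (acc : Int),
      rem.Nodup → rem.length ≤ fuel → pvOuter fuel rem acc = acc + pvMu rem := by
  intro fuel
  induction fuel with
  | zero =>
    intro rem acc _ hlen
    have hnil : rem = [] := by
      cases rem with
      | nil => rfl
      | cons a l => simp at hlen
    subst hnil
    simp [pvOuter, pvMu]
  | succ fuel ih =>
    intro rem acc hnd hlen
    cases rem with
    | nil => simp [pvOuter, pvMu]
    | cons fs rest =>
      obtain ⟨f, rest1, heq1, hmem1, hexit1, hchar1, hlen1, hnd1res⟩ :=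
        pvInner_spec fs 1 (Or.inl rfl) (fs :: rest).length rest 1 hnd (by simp) (by norm_num)
      have hfs_nin : fs ∉ rest := (List.nodup_cons.mp hnd).1
      have hsub1 : ∀ x ∈ rest1, x ∈ rest := fun x hx => ((hchar1 x).mp hx).1
      have hnd1 : (fs :: rest1).Nodup :=
        List.nodup_cons.mpr ⟨fun hc => hfs_nin (hsub1 fs hc), hnd1res⟩
      obtain ⟨g, rest2, heq2, hmem2, hexit2, hchar2, hlen2, hnd2res⟩ :=
        pvInner_spec fs (-1) (Or.inr rfl) (fs :: rest1).length rest1 (-1) hnd1 (by simp)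
          (by norm_num)
      have hred : pvOuter (fuel + 1) (fs :: rest) acc = pvOuter fuel rest2 (acc + 1) := by
        simp only [pvOuter, heq1, heq2, PySem.List.remove?_cons_self, Option.getD_some]
      have hmemB : ∀ x, x ∈ rest2 ↔ x ∈ (fs :: rest) ∧
          ∀ i : Int, -(g : Int) ≤ i → i ≤ (f : Int) → x ≠ pvNbr fs i := by
        intro x
        rw [hchar2 x, hchar1 x]
        constructor
        · rintro ⟨⟨hxrest, hf⟩, hg⟩
          refine ⟨List.mem_cons_of_mem _ hxrest, ?_⟩
          intro i h1 h2 hxe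
          rcases lt_trichotomy i 0 with hi | hi | hi
          · have hj : ((-1 - i).toNat : Int) = -1 - i := Int.toNat_of_nonneg (by omega)
            exact hg (-1 - i).toNat (by omega) (by rw [hxe]; congr 1; rw [hj]; ring)
          · subst hi
            rw [pvNbr_zero] at hxe
            exact hfs_nin (hxe ▸ hxrest)
          · have hj : ((i - 1).toNat : Int) = i - 1 := Int.toNat_of_nonneg (by omega)
            exact hf (i - 1).toNat (by omega) (by rw [hxe]; congr 1; rw [hj]; ring)
        · rintro ⟨hxcons, hall⟩
          have hxfs : x ≠ fs := by
            have h0 := hall 0 (by omega) (by omega)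
            rw [pvNbr_zero] at h0
            exact h0
          have hxrest : x ∈ rest := by
            rcases List.mem_cons.mp hxcons with h | h
            · exact absurd h hxfs
            · exact h
          refine ⟨⟨hxrest, fun j hj => ?_⟩, fun j hj => ?_⟩
          · have h1 := hall (1 + (j : Int)) (by omega) (by omega)
            simpa using h1
          · have h1 := hall (-1 - (j : Int)) (by omega) (by omega)
            convert h1 using 2
            ring
      have hinB : ∀ i : Int, -(g : Int) ≤ i → i ≤ (f : Int) → pvNbr fs i ∈ fs :: rest := by
        intro i h1 h2
        rcases lt_trichotomy i 0 with hi | hi | hi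
        · have hj : ((-1 - i).toNat : Int) = -1 - i := Int.toNat_of_nonneg (by omega)
          have hm := hmem2 (-1 - i).toNat (by omega)
          have he : pvNbr fs (-1 + ((-1 - i).toNat : Int) * -1) = pvNbr fs i := by
            congr 1; rw [hj]; ring
          rw [he] at hm
          exact List.mem_cons_of_mem _ (hsub1 _ hm)
        · subst hi
          rw [pvNbr_zero]
          exact List.mem_cons_self ..
        · have hj : ((i - 1).toNat : Int) = i - 1 := Int.toNat_of_nonneg (by omega)
          have hm := hmem1 (i - 1).toNat (by omega)
          have he : pvNbr fs (1 + ((i - 1).toNat : Int) * 1) = pvNbr fs i := by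
            congr 1; rw [hj]; ring
          rw [he] at hm
          exact List.mem_cons_of_mem _ hm
      have hhiB : pvNbr fs ((f : Int) + 1) ∉ fs :: rest := by
        intro hc
        have hne : pvNbr fs ((f : Int) + 1) ≠ fs := by
          intro h
          have := pvNbr_inj fs (h.trans (pvNbr_zero fs).symm)
          omega
        have hrest : pvNbr fs ((f : Int) + 1) ∈ rest := by
          rcases List.mem_cons.mp hc with h | h
          · exact absurd h hne
          · exact h
        have h1m : pvNbr fs ((f : Int) + 1) ∈ rest1 :=
          (hchar1 _).mpr ⟨hrest, fun j hj he => by have := pvNbr_inj fs he; omega⟩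
        exact hexit1 (by convert h1m using 2; ring)
      have hloB : pvNbr fs (-(g : Int) - 1) ∉ fs :: rest := by
        intro hc
        have hne : pvNbr fs (-(g : Int) - 1) ≠ fs := by
          intro h
          have := pvNbr_inj fs (h.trans (pvNbr_zero fs).symm)
          omega
        have hrest : pvNbr fs (-(g : Int) - 1) ∈ rest := by
          rcases List.mem_cons.mp hc with h | h
          · exact absurd h hne
          · exact h
        have h1m : pvNbr fs (-(g : Int) - 1) ∈ rest1 :=
          (hchar1 _).mpr ⟨hrest, fun j hj he => by have := pvNbr_inj fs he; omega⟩
        have h2m : pvNbr fs (-(g : Int) - 1) ∈ rest2 :=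
          (hchar2 _).mpr ⟨h1m, fun j hj he => by have := pvNbr_inj fs he; omega⟩
        exact hexit2 (by convert h2m using 2; ring)
      have hmu : pvMu (fs :: rest) = pvMu rest2 + 1 :=
        pvMu_remove_run fs g f (fs :: rest) rest2 hnd hnd2res hmemB hinB hhiB hloB
      have hlen' : rest2.length ≤ fuel := by
        simp only [List.length_cons] at hlen
        omega
      rw [hred, ih rest2 (acc + 1) hnd2res hlen', hmu]
      ring

theorem pvPrevB_eq (x : (Int × Int) × (Int × Int)) :
    (if x.2.1 = 0 then ((x.1.1 - 1, x.1.2), x.2) else ((x.1.1, x.1.2 - 1), x.2)) = pvNbr x (-1) := by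
  unfold pvNbr pvStepA
  by_cases h : x.2.1 = 0 <;> simp [h, Prod.ext_iff] <;> ring

theorem pvFoldl_count (R : List ((Int × Int) × (Int × Int))) :
    ∀ (l : List ((Int × Int) × (Int × Int))) (acc : Int),
      l.foldl (fun total fs => if pvNbr fs (-1) ∈ R then total else total + 1) acc
      = acc + (l.countP (fun x => decide (pvNbr x (-1) ∉ R)) : Int) := by
  intro l
  induction l with
  | nil => intro acc; simp
  | cons x l ih =>
    intro acc
    rw [List.foldl_cons, List.countP_cons]
    by_cases h : pvNbr x (-1) ∈ R <;> simp only [h, if_pos, if_neg, not_false_iff,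
      decide_not, decide_true, decide_false, not_true] <;>
      rw [ih] <;> simp only [decide_not] <;> push_cast <;> ring

theorem pvAlt_eq_mu (l : List ((Int × Int) × (Int × Int))) (h : l.Nodup) :
    get_n_sides_alt l = pvMu l := by
  show (PySem.Set.ofList l).foldl
      (fun total fs =>
        let prev : (Int × Int) × (Int × Int) :=
          if fs.2.1 = 0 then ((fs.1.1 - 1, fs.1.2), fs.2) else ((fs.1.1, fs.1.2 - 1), fs.2)
        if prev ∈ PySem.Set.ofList l then total else total + 1) 0 = pvMu l
  rw [PySem.Set.ofList_eq_self_of_nodup l h]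
  have hf : (fun (total : Int) (fs : (Int × Int) × (Int × Int)) =>
      let prev : (Int × Int) × (Int × Int) :=
        if fs.2.1 = 0 then ((fs.1.1 - 1, fs.1.2), fs.2) else ((fs.1.1, fs.1.2 - 1), fs.2)
      if prev ∈ l then total else total + 1)
      = (fun total fs => if pvNbr fs (-1) ∈ l then total else total + 1) := by
    funext t fs; simp [pvPrevB_eq]
  rw [hf, pvFoldl_count l l 0]
  unfold pvMu
  ring

-- ===== VERDICT (by name: the statement is the Claim_ definition above) =====
theorem get_n_sides_spec : Claim_equal_get_n_sides := by
  intro l _ hpre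
  unfold Spec_get_n_sides
  have hA : get_n_sides l = pvMu l := by
    have := pvOuter_spec l.length l 0 hpre le_rfl
    simpa [get_n_sides] using this
  rw [hA, pvAlt_eq_mu l hpre]
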